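-- pv_equiv track=rewrite | github.com/maojui/Cytro | cytro/ecm.py | naf
-- ===== SOURCE A (Python) =====
-- def naf(d):
--     '''Finds a number's non-adjacent form, reverses the bits, replaces the
-- -1's with 3's, and interprets the result base 4.
--
-- Returns the result interpreted as if in base 4.'''
--     g = 0
--     while d:
--         g <<= 2
--         g ^= ((d & 2) & (d << 1)) ^ (d & 1)
--         d += (d & 2) >> 1
--         d >>= 1
--     return g
-- ===== SOURCE B (Python) =====
-- def naf(d):
--     '''Finds a number's non-adjacent form, reverses the bits, replaces the
-- -1's with 3's, and interprets the result base 4.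
--
-- Returns the result interpreted as if in base 4.'''
--     # Phase 1: extract the NAF digits (with -1 encoded as 3), least significant first.
--     digits = []
--     while d:
--         z = 2 - d % 4 if d % 2 else 0
--         digits.append(3 if z == -1 else z)
--         d = (d - z) // 2
--     # Phase 2: fold the digit list as a base-4 number (first digit ends up most significant).
--     g = 0
--     for t in digits:
--         g = g * 4 + t
--     return g
-- ===== Notes on version B (the rewrite author's own statement) =====
-- stated objective: alternative
-- what changed: Replaces the single fused bit-twiddling loop (shift/xor/and accumulator updated in place) with a two-phase decomposition: first an arithmetic loop (d%4, d%2, exact (d-z)//2) collecting the NAF digit list, then a separate base-4 left fold over that list.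
import Mathlib
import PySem

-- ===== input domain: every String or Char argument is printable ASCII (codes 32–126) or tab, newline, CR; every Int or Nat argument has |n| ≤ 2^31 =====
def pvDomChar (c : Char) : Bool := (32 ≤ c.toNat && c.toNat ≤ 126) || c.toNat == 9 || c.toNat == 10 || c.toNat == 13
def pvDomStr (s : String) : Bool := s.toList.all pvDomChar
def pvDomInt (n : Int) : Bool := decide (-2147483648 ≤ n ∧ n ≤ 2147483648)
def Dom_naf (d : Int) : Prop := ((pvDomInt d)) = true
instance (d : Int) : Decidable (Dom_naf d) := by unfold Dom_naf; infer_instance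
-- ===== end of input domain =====

-- B replaces A's fused bit-twiddling accumulator loop by a two-phase decomposition
-- (collect the NAF digit list arithmetically, then fold it base 4); alternative, not faster.

-- ===== PORT A =====
-- Python `&` / `^` on ints are two's-complement Int.land / Int.xor (exact);
-- `<<` / `>>` are Lean's Int `<<<` / `>>>` (arithmetic shift, exact).
-- The loop is written with a fuel counter as a pure totality guard; `d.natAbs + 1`
-- is proved sufficient below (pv_next_natAbs_lt / pv_loopA_fuel), so the port
-- computes A's value on every input.
def nafLoopA : Nat → Int → Int → Int
  | 0, g, _ => g
  | fuel + 1, g, d =>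
    if d = 0 then g
    else
      nafLoopA fuel
        (Int.xor (g <<< (2 : Int))
          (Int.xor (Int.land (Int.land d 2) (d <<< (1 : Int))) (Int.land d 1)))
        ((d + (Int.land d 2) >>> (1 : Int)) >>> (1 : Int))

def naf (d : Int) : Int := nafLoopA (d.natAbs + 1) 0 d

-- ===== PORT B =====
-- Phase 1 of Source B: the NAF digit list, least significant first (same fuel guard).
def nafDigits : Nat → Int → List Int
  | 0, _ => []
  | fuel + 1, d =>
    if d = 0 then []
    else
      let z : Int := if PySem.Int.mod d 2 ≠ 0 then 2 - PySem.Int.mod d 4 else 0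
      (if z = -1 then 3 else z) :: nafDigits fuel (PySem.Int.floordiv (d - z) 2)

-- Phase 2 of Source B: fold the digits base 4.
def naf_alt (d : Int) : Int := (nafDigits (d.natAbs + 1) d).foldl (fun g t => g * 4 + t) 0

-- ===== PRECONDITION & SPEC =====
def Spec_naf (d : Int) (out : Int) : Prop := out = naf_alt d
instance (d : Int) (out : Int) : Decidable (Spec_naf d out) := by unfold Spec_naf; infer_instance

-- ===== CLAIM (what is proved, stated in full; the proofs are below) =====
def Claim_equal_naf : Prop := ∀ (d : Int), Dom_naf d → Spec_naf d (naf d)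

-- ===== LEMMAS AND PROOFS =====

theorem pv_shiftR1 (x : Int) : x >>> (1 : Int) = x / 2 := by
  rw [show (1 : Int) = ((1 : Nat) : Int) by norm_num, Int.shiftRight_natCast_right,
    Int.shiftRight_eq_div_pow]
  norm_num

theorem pv_shiftL1 (x : Int) : x <<< (1 : Int) = x * 2 := by
  rw [show (1 : Int) = ((1 : Nat) : Int) by norm_num, Int.shiftLeft_eq_mul_pow]
  norm_num

theorem pv_shiftL2 (x : Int) : x <<< (2 : Int) = x * 4 := by
  rw [show (2 : Int) = ((2 : Nat) : Int) by norm_num, Int.shiftLeft_eq_mul_pow]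
  norm_num

theorem pv_and_mod4 (c m : Nat) (hc : c < 4) : c &&& m = c &&& (m % 4) := by
  apply Nat.eq_of_testBit_eq
  intro i
  rw [Nat.testBit_and, Nat.testBit_and, show (4:Nat) = 2^2 by norm_num, Nat.testBit_mod_two_pow]
  by_cases hi : i < 2
  · simp [hi]
  · have : c.testBit i = false := Nat.testBit_lt_two_pow (by
      calc c < 4 := hc
        _ = 2 ^ 2 := by norm_num
        _ ≤ 2 ^ i := Nat.pow_le_pow_right (by norm_num) (by omega))
    simp [this]

theorem pv_ldiff_mod4 (c m : Nat) (hc : c < 4) : c.ldiff m = c.ldiff (m % 4) := by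
  apply Nat.eq_of_testBit_eq
  intro i
  rw [Nat.testBit_ldiff, Nat.testBit_ldiff, show (4:Nat) = 2^2 by norm_num, Nat.testBit_mod_two_pow]
  by_cases hi : i < 2
  · simp [hi]
  · have : c.testBit i = false := Nat.testBit_lt_two_pow (by
      calc c < 4 := hc
        _ = 2 ^ 2 := by norm_num
        _ ≤ 2 ^ i := Nat.pow_le_pow_right (by norm_num) (by omega))
    simp [this]

theorem pv_ld_lit (c m v : Nat) (hc : c < 4) (hv : v < 4)
    (h0 : (c.testBit 0 && !m.testBit 0) = v.testBit 0)
    (h1 : (c.testBit 1 && !m.testBit 1) = v.testBit 1) : Nat.ldiff c m = v := by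
  apply Nat.eq_of_testBit_eq
  intro i
  rw [Nat.testBit_ldiff]
  match i with
  | 0 => exact h0
  | 1 => exact h1
  | (i+2) =>
    have hb : (2:Nat)^2 ≤ 2^(i+2) := Nat.pow_le_pow_right (by norm_num) (by omega)
    have hc' : Nat.testBit c (i+2) = false := Nat.testBit_lt_two_pow (by omega)
    have hv' : Nat.testBit v (i+2) = false := Nat.testBit_lt_two_pow (by omega)
    simp [hc', hv']

theorem pv_lit_and_10 : ((1:Nat) &&& 0) = 0 := by decide
theorem pv_lit_and_11 : ((1:Nat) &&& 1) = 1 := by decide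
theorem pv_lit_and_12 : ((1:Nat) &&& 2) = 0 := by decide
theorem pv_lit_and_13 : ((1:Nat) &&& 3) = 1 := by decide
theorem pv_lit_and_20 : ((2:Nat) &&& 0) = 0 := by decide
theorem pv_lit_and_21 : ((2:Nat) &&& 1) = 0 := by decide
theorem pv_lit_and_22 : ((2:Nat) &&& 2) = 2 := by decide
theorem pv_lit_and_23 : ((2:Nat) &&& 3) = 2 := by decide
theorem pv_lit_ld_00 : Nat.ldiff 0 0 = 0 := pv_ld_lit _ _ _ (by norm_num) (by norm_num) (by decide) (by decide)
theorem pv_lit_ld_01 : Nat.ldiff 0 1 = 0 := pv_ld_lit _ _ _ (by norm_num) (by norm_num) (by decide) (by decide)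
theorem pv_lit_ld_02 : Nat.ldiff 0 2 = 0 := pv_ld_lit _ _ _ (by norm_num) (by norm_num) (by decide) (by decide)
theorem pv_lit_ld_03 : Nat.ldiff 0 3 = 0 := pv_ld_lit _ _ _ (by norm_num) (by norm_num) (by decide) (by decide)
theorem pv_lit_ld_10 : Nat.ldiff 1 0 = 1 := pv_ld_lit _ _ _ (by norm_num) (by norm_num) (by decide) (by decide)
theorem pv_lit_ld_11 : Nat.ldiff 1 1 = 0 := pv_ld_lit _ _ _ (by norm_num) (by norm_num) (by decide) (by decide)
theorem pv_lit_ld_12 : Nat.ldiff 1 2 = 1 := pv_ld_lit _ _ _ (by norm_num) (by norm_num) (by decide) (by decide)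
theorem pv_lit_ld_13 : Nat.ldiff 1 3 = 0 := pv_ld_lit _ _ _ (by norm_num) (by norm_num) (by decide) (by decide)
theorem pv_lit_ld_20 : Nat.ldiff 2 0 = 2 := pv_ld_lit _ _ _ (by norm_num) (by norm_num) (by decide) (by decide)
theorem pv_lit_ld_21 : Nat.ldiff 2 1 = 2 := pv_ld_lit _ _ _ (by norm_num) (by norm_num) (by decide) (by decide)
theorem pv_lit_ld_22 : Nat.ldiff 2 2 = 0 := pv_ld_lit _ _ _ (by norm_num) (by norm_num) (by decide) (by decide)
theorem pv_lit_ld_23 : Nat.ldiff 2 3 = 0 := pv_ld_lit _ _ _ (by norm_num) (by norm_num) (by decide) (by decide)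

theorem pv_land_one (d : Int) : Int.land d 1 = d % 2 := by
  cases d with
  | ofNat n =>
      show (((n &&& 1 : Nat) : Int)) = _
      rw [Nat.and_comm, pv_and_mod4 1 n (by norm_num)]
      have h4 : n % 4 = 0 ∨ n % 4 = 1 ∨ n % 4 = 2 ∨ n % 4 = 3 := by omega
      rcases h4 with h | h | h | h <;> rw [h] <;>
        simp only [Int.ofNat_eq_natCast, pv_lit_and_10, pv_lit_and_11, pv_lit_and_12, pv_lit_and_13] <;> omega
  | negSucc m =>
      show (((Nat.ldiff 1 m : Nat) : Int)) = _
      rw [pv_ldiff_mod4 1 m (by norm_num)]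
      have h4 : m % 4 = 0 ∨ m % 4 = 1 ∨ m % 4 = 2 ∨ m % 4 = 3 := by omega
      rcases h4 with h | h | h | h <;> rw [h] <;>
        simp only [Int.negSucc_eq, pv_lit_ld_10, pv_lit_ld_11, pv_lit_ld_12, pv_lit_ld_13] <;> omega

theorem pv_land_two (d : Int) : Int.land d 2 = d % 4 - d % 2 := by
  cases d with
  | ofNat n =>
      show (((n &&& 2 : Nat) : Int)) = _
      rw [Nat.and_comm, pv_and_mod4 2 n (by norm_num)]
      have h4 : n % 4 = 0 ∨ n % 4 = 1 ∨ n % 4 = 2 ∨ n % 4 = 3 := by omega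
      rcases h4 with h | h | h | h <;> rw [h] <;>
        simp only [Int.ofNat_eq_natCast, pv_lit_and_20, pv_lit_and_21, pv_lit_and_22, pv_lit_and_23] <;> omega
  | negSucc m =>
      show (((Nat.ldiff 2 m : Nat) : Int)) = _
      rw [pv_ldiff_mod4 2 m (by norm_num)]
      have h4 : m % 4 = 0 ∨ m % 4 = 1 ∨ m % 4 = 2 ∨ m % 4 = 3 := by omega
      rcases h4 with h | h | h | h <;> rw [h] <;>
        simp only [Int.negSucc_eq, pv_lit_ld_20, pv_lit_ld_21, pv_lit_ld_22, pv_lit_ld_23] <;> omega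

theorem pv_land_zero (x : Int) : Int.land 0 x = 0 := by
  cases x with
  | ofNat n => show (((0 &&& n : Nat) : Int)) = 0; simp
  | negSucc m =>
      show (((Nat.ldiff 0 m : Nat) : Int)) = 0
      rw [pv_ldiff_mod4 0 m (by norm_num)]
      have h4 : m % 4 = 0 ∨ m % 4 = 1 ∨ m % 4 = 2 ∨ m % 4 = 3 := by omega
      rcases h4 with h | h | h | h <;> rw [h] <;>
        simp only [pv_lit_ld_00, pv_lit_ld_01, pv_lit_ld_02, pv_lit_ld_03] <;> rfl

theorem pv_two_land (x : Int) : Int.land 2 x = x % 4 - x % 2 := by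
  cases x with
  | ofNat n =>
      show (((2 &&& n : Nat) : Int)) = _
      rw [pv_and_mod4 2 n (by norm_num)]
      have h4 : n % 4 = 0 ∨ n % 4 = 1 ∨ n % 4 = 2 ∨ n % 4 = 3 := by omega
      rcases h4 with h | h | h | h <;> rw [h] <;>
        simp only [Int.ofNat_eq_natCast, pv_lit_and_20, pv_lit_and_21, pv_lit_and_22, pv_lit_and_23] <;> omega
  | negSucc m =>
      show (((Nat.ldiff 2 m : Nat) : Int)) = _
      rw [pv_ldiff_mod4 2 m (by norm_num)]
      have h4 : m % 4 = 0 ∨ m % 4 = 1 ∨ m % 4 = 2 ∨ m % 4 = 3 := by omega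
      rcases h4 with h | h | h | h <;> rw [h] <;>
        simp only [Int.negSucc_eq, pv_lit_ld_20, pv_lit_ld_21, pv_lit_ld_22, pv_lit_ld_23] <;> omega

theorem pv_nat_xor4 (m b e : Nat) (hb : b < 4) (he : e < 4) :
    (4 * m + b) ^^^ e = 4 * m + (b ^^^ e) := by
  have hbe : b ^^^ e < 4 := by
    have := Nat.xor_lt_two_pow (x := b) (y := e) (n := 2) (by omega) (by omega)
    omega
  apply Nat.eq_of_testBit_eq
  intro i
  have h1 : (4 * m + b).testBit i = if i < 2 then b.testBit i else m.testBit (i - 2) := by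
    have := Nat.testBit_two_pow_mul_add m (b := b) (i := 2) (by omega) i
    simpa [show (2 : Nat) ^ 2 = 4 by norm_num, Nat.mul_comm] using this
  have h2 : (4 * m + (b ^^^ e)).testBit i
      = if i < 2 then (b ^^^ e).testBit i else m.testBit (i - 2) := by
    have := Nat.testBit_two_pow_mul_add m (b := b ^^^ e) (i := 2) (by omega) i
    simpa [show (2 : Nat) ^ 2 = 4 by norm_num, Nat.mul_comm] using this
  rw [Nat.testBit_xor, h1, h2, Nat.testBit_xor]
  by_cases hi : i < 2
  · simp [hi]
  · have he' : e.testBit i = false := Nat.testBit_lt_two_pow (by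
      calc e < 4 := he
        _ = 2 ^ 2 := by norm_num
        _ ≤ 2 ^ i := Nat.pow_le_pow_right (by norm_num) (by omega))
    simp [hi, he']

theorem pv_int_xor4 (g : Int) (e : Nat) (he : e < 4) :
    Int.xor (g * 4) ((e : Nat) : Int) = g * 4 + e := by
  cases g with
  | ofNat m =>
      have h : (Int.ofNat m) * 4 = ((4 * m : Nat) : Int) := by
        simp only [Int.ofNat_eq_natCast]; push_cast; ring
      rw [h]
      show (((4 * m ^^^ e : Nat) : Int)) = _
      have := pv_nat_xor4 m 0 e (by norm_num) he
      simp only [Nat.add_zero, Nat.zero_xor] at this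
      rw [this]
      push_cast; ring
  | negSucc m =>
      have h : (Int.negSucc m) * 4 = Int.negSucc (4 * m + 3) := by
        simp only [Int.negSucc_eq]; push_cast; ring
      rw [h]
      show Int.negSucc ((4 * m + 3) ^^^ e) = _
      rw [pv_nat_xor4 m 3 e (by norm_num) he]
      interval_cases e <;>
        simp only [Int.negSucc_eq, show ((3:Nat) ^^^ 0) = 3 by decide,
          show ((3:Nat) ^^^ 1) = 2 by decide, show ((3:Nat) ^^^ 2) = 1 by decide,
          show ((3:Nat) ^^^ 3) = 0 by decide] <;> push_cast <;> omega

-- A's accumulator update equals B's `g*4 + digit`.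
theorem pv_acc_eq (g d : Int) :
    Int.xor (g <<< (2 : Int))
        (Int.xor (Int.land (Int.land d 2) (d <<< (1 : Int))) (Int.land d 1))
      = g * 4 + (let z : Int := if PySem.Int.mod d 2 ≠ 0 then 2 - PySem.Int.mod d 4 else 0
                 if z = -1 then 3 else z) := by
  rw [pv_shiftL2, pv_shiftL1, pv_land_one, pv_land_two,
    PySem.Int.mod_eq_emod_of_pos (by norm_num : (0:Int) < 2),
    PySem.Int.mod_eq_emod_of_pos (by norm_num : (0:Int) < 4)]
  have h4 : d % 4 = 0 ∨ d % 4 = 1 ∨ d % 4 = 2 ∨ d % 4 = 3 := by omega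
  have h2 : d % 2 = (d % 4) % 2 := by omega
  rcases h4 with h | h | h | h <;> simp only [h2, h] <;> norm_num
  · rw [pv_land_zero]
    simpa using pv_int_xor4 g 0 (by norm_num)
  · rw [pv_land_zero]
    simpa using pv_int_xor4 g 1 (by norm_num)
  · rw [pv_two_land]
    have hz : (d * 2) % 4 - (d * 2) % 2 = 0 := by omega
    rw [hz, show Int.xor 0 0 = 0 by decide]
    simpa using pv_int_xor4 g 0 (by norm_num)
  · rw [pv_two_land]
    have hz : (d * 2) % 4 - (d * 2) % 2 = 2 := by omega
    rw [hz, show Int.xor 2 1 = 3 by decide]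
    simpa using pv_int_xor4 g 3 (by norm_num)

-- A's next loop value equals B's next value.
theorem pv_next_eq (d : Int) :
    (d + (Int.land d 2) >>> (1 : Int)) >>> (1 : Int)
      = PySem.Int.floordiv
          (d - (if PySem.Int.mod d 2 ≠ 0 then 2 - PySem.Int.mod d 4 else 0)) 2 := by
  rw [pv_shiftR1, pv_shiftR1, pv_land_two,
    PySem.Int.mod_eq_emod_of_pos (by norm_num : (0:Int) < 2),
    PySem.Int.mod_eq_emod_of_pos (by norm_num : (0:Int) < 4),
    PySem.Int.floordiv_eq_ediv_of_pos (by norm_num : (0:Int) < 2)]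
  have h4 : d % 4 = 0 ∨ d % 4 = 1 ∨ d % 4 = 2 ∨ d % 4 = 3 := by omega
  have h2 : d % 2 = (d % 4) % 2 := by omega
  rcases h4 with h | h | h | h <;> simp only [h2, h] <;> norm_num <;> omega

-- The fuel bound: B's next value strictly shrinks in absolute value.
theorem pv_next_natAbs_lt (d : Int) (hd : d ≠ 0) :
    (PySem.Int.floordiv
        (d - (if PySem.Int.mod d 2 ≠ 0 then 2 - PySem.Int.mod d 4 else 0)) 2).natAbs
      < d.natAbs := by
  rw [PySem.Int.mod_eq_emod_of_pos (by norm_num : (0:Int) < 2),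
    PySem.Int.mod_eq_emod_of_pos (by norm_num : (0:Int) < 4),
    PySem.Int.floordiv_eq_ediv_of_pos (by norm_num : (0:Int) < 2)]
  have h4 : d % 4 = 0 ∨ d % 4 = 1 ∨ d % 4 = 2 ∨ d % 4 = 3 := by omega
  have h2 : d % 2 = (d % 4) % 2 := by omega
  rcases h4 with h | h | h | h <;> simp only [h2, h] <;> norm_num <;> omega

-- With enough fuel, A's loop is B's fold over B's digit list.
theorem pv_loop_eq : ∀ (fuel : Nat) (d : Int), d.natAbs < fuel → ∀ g : Int,
    nafLoopA fuel g d = (nafDigits fuel d).foldl (fun g t => g * 4 + t) g := by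
  intro fuel
  induction fuel with
  | zero => intro d hlt; omega
  | succ n ih =>
      intro d hlt g
      by_cases hd : d = 0
      · subst hd; simp [nafLoopA, nafDigits]
      · rw [nafLoopA, nafDigits]
        simp only [hd, if_neg, not_false_iff, List.foldl_cons]
        rw [pv_acc_eq, pv_next_eq]
        exact ih _ (by have := pv_next_natAbs_lt d hd; omega) _

-- Both ports pass the same fuel `d.natAbs + 1`, which the previous lemma covers.
theorem pv_ports_eq (d : Int) : naf d = naf_alt d := by
  unfold naf naf_alt
  exact pv_loop_eq (d.natAbs + 1) d (by omega) 0

-- ===== VERDICT (by name: the statement is the Claim_ definition above) =====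
theorem naf_spec : Claim_equal_naf := by
  intro d _
  exact pv_ports_eq d
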